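-- pv_equiv track=rewrite | github.com/TheSimonShell/philosophy_popper | 03 - Anagramas/main_anagrams.py | generate_anagrams
-- ===== SOURCE A (Python) =====
-- from collections import Counter
--
-- def generate_anagrams(word): # Cria uma função generate_anagrams com a entrada da variável word, para gerar anagramas
--     counts = Counter(word) # Conta quantas vezes cada letra aparece
--     result = [] # Lista onde serão guardados os anagramas
--
--     def backtrack(path): # Função auxiliar recursiva para construir os anagramas
--         if len(path) == len(word): # Se o tamanho do caminho for igual ao tamanho da palavra
--             result.append("".join(path)) # Junta as letras e adiciona à lista de resultados
--             return
--
--         for char in counts: # Percorre cada letra disponível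
--             if counts[char] > 0: # Se ainda houver ocorrências dessa letra
--                 counts[char] -= 1 # Usa uma ocorrência dessa letra
--                 path.append(char) # Adiciona a letra ao caminho atual
--
--                 backtrack(path) # Chama recursivamente para continuar a construir
--
--                 path.pop() # Remove a última letra (backtrack)
--                 counts[char] += 1 # Restaura a ocorrência da letra
--
--     backtrack([]) # Inicia o processo com um caminho vazio
--     return sorted(result) # Retorna a lista ordenada de anagramas
-- ===== SOURCE B (Python) =====
-- def generate_anagrams(word):
--     if not word:
--         return [""]
--     result = []
--     for c in sorted(set(word)):
--         rest = list(word)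
--         rest.remove(c)
--         for tail in generate_anagrams("".join(rest)):
--             result.append(c + tail)
--     return result
-- ===== Notes on version B (the rewrite author's own statement) =====
-- stated objective: alternative
-- what changed: Replaces the Counter-based duplicate-avoiding backtracking with a final sort by a direct recursion that, for each distinct letter in sorted order, prepends it to the anagrams of the remaining letters, emitting the distinct anagrams already in lexicographic order with no Counter, no dedup set and no final sort.
import Mathlib
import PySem

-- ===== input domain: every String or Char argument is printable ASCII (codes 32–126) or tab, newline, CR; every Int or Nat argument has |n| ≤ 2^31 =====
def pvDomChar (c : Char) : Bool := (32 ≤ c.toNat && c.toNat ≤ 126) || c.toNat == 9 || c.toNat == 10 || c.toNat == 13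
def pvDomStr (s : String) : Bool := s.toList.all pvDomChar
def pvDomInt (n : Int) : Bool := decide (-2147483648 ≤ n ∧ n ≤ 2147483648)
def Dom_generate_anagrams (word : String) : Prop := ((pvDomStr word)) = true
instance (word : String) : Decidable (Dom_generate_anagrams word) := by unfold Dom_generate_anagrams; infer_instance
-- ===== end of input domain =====

-- B builds the distinct anagrams directly in lexicographic order (smallest distinct letter first, recursively), with no Counter, no dedup set and no final sort; alternative algorithm, same result, no speed claim.


-- ===== PORT A =====
-- backtrack(path): counts is mutated then restored, so the functional port passes the
-- modified dict into the recursive call and keeps the original for the rest of the loop.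
-- fuel = wordLen - len(path) bounds the recursion depth (a guard only; the guarded branch is never hit).
def pvBacktrack (wordLen : Nat) (fuel : Nat) (counts : PySem.Dict Char Int) (path : List Char) : List String :=
  if path.length = wordLen then [String.ofList path]
  else match fuel with
    | 0 => []
    | fuel' + 1 =>
      counts.keys.foldl (fun acc char =>
        if 0 < counts.getD char 0 then
          acc ++ pvBacktrack wordLen fuel' (counts.modify char 0 (fun v => v - 1)) (path ++ [char])
        else acc) []

def generate_anagrams (word : String) : List String :=
  let counts := PySem.Dict.counter word.toList
  PySem.List.sorted (pvBacktrack word.toList.length word.toList.length counts []) (fun x => x) false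

-- ===== PORT B =====
-- recursion of B on the word, via toList; fuel = len(word) bounds the depth (guard only).
-- c + tail is String.ofList (c :: tail.toList); "".join(rest) then recursing is recursing on rest.
def pvGenB (fuel : Nat) (w : List Char) : List String :=
  if w.isEmpty then [""]
  else match fuel with
    | 0 => []
    | fuel' + 1 =>
      (PySem.List.sorted (PySem.Set.ofList w) (fun c => c) false).foldl
        (fun result c =>
          match PySem.List.remove? w c with
          | none => result  -- unreachable: c is drawn from set(word)
          | some rest =>
            (pvGenB fuel' rest).foldl
              (fun res tail => res ++ [String.ofList (c :: tail.toList)]) result) []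

def generate_anagrams_alt (word : String) : List String :=
  pvGenB word.toList.length word.toList

-- ===== PRECONDITION & SPEC =====
def Spec_generate_anagrams (word : String) (out : List String) : Prop := out = generate_anagrams_alt word
instance (word : String) (out : List String) : Decidable (Spec_generate_anagrams word out) := by unfold Spec_generate_anagrams; infer_instance

-- ===== CLAIM (what is proved, stated in full; the proofs are below) =====
def Claim_equal_generate_anagrams : Prop := ∀ (word : String), Dom_generate_anagrams word → Spec_generate_anagrams word (generate_anagrams word)

-- ===== LEMMAS AND PROOFS =====

-- total number of letters still available in the counter
def pvTotal (counts : PySem.Dict Char Int) : Nat :=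
  (counts.keys.map (fun c => (counts.getD c 0).toNat)).sum

theorem pv_mem_keys_of_getD_pos (d : PySem.Dict Char Int) (c : Char) (h : 0 < d.getD c 0) :
    c ∈ d.keys := by
  by_contra hc
  rw [← PySem.Dict.contains_iff_mem_keys] at hc
  have := PySem.Dict.getD_of_not_contains (d := d) (k := c) (d0 := (0 : Int)) (by
    cases hcon : d.contains c
    · rfl
    · exact absurd hcon hc)
  omega

theorem pv_sum_map_succ_at (l : List Char) (hn : l.Nodup) (c : Char) (hc : c ∈ l)
    (f g : Char → Nat) (hfg : ∀ d ∈ l, d ≠ c → f d = g d) (hfc : f c + 1 = g c) :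
    (l.map f).sum + 1 = (l.map g).sum := by
  induction l with
  | nil => cases hc
  | cons x t ih =>
    simp only [List.map_cons, List.sum_cons]
    rcases List.mem_cons.mp hc with rfl | hct
    · have : ∀ d ∈ t, f d = g d := fun d hd =>
        hfg d (List.mem_cons_of_mem _ hd) (fun h => (List.nodup_cons.mp hn).1 (h ▸ hd))
      rw [List.map_congr_left this]
      omega
    · have hx : f x = g x := hfg x List.mem_cons_self
        (fun h => (List.nodup_cons.mp hn).1 (h ▸ hct))
      have := ih (List.nodup_cons.mp hn).2 hct
        (fun d hd hdc => hfg d (List.mem_cons_of_mem _ hd) hdc)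
      omega

theorem pvTotal_modify (counts : PySem.Dict Char Int) (c : Char)
    (hn : counts.keys.Nodup) (hpos : 0 < counts.getD c 0) :
    pvTotal (counts.modify c 0 (fun v => v - 1)) + 1 = pvTotal counts := by
  have hmem : c ∈ counts.keys := pv_mem_keys_of_getD_pos counts c hpos
  have hkeys : (counts.modify c 0 (fun v => v - 1)).keys = counts.keys := by
    rw [PySem.Dict.keys_modify, PySem.Dict.keys_insert_of_contains]
    exact (PySem.Dict.contains_iff_mem_keys _ _).mpr hmem
  unfold pvTotal
  rw [hkeys]
  exact pv_sum_map_succ_at counts.keys hn c hmem _ _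
    (fun d _ hdc => by rw [PySem.Dict.getD_modify, if_neg hdc])
    (by rw [PySem.Dict.getD_modify, if_pos rfl]; omega)

theorem pv_exists_pos_of_total_pos (counts : PySem.Dict Char Int) (h : 0 < pvTotal counts) :
    ∃ c, 0 < counts.getD c 0 := by
  by_contra hno
  simp only [not_exists, not_lt] at hno
  have : pvTotal counts = 0 := by
    unfold pvTotal
    apply List.sum_eq_zero
    intro x hx
    rcases List.mem_map.mp hx with ⟨c, _, rfl⟩
    have := hno c
    omega
  omega

-- total = 0 forces every remaining count to be 0
theorem pv_getD_zero_of_total_zero (counts : PySem.Dict Char Int)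
    (hnn : ∀ c, 0 ≤ counts.getD c 0) (h0 : pvTotal counts = 0) (c : Char) :
    counts.getD c 0 = 0 := by
  by_contra hne
  have hpos : 0 < counts.getD c 0 := lt_of_le_of_ne (hnn c) (Ne.symm hne)
  have hmem : c ∈ counts.keys := pv_mem_keys_of_getD_pos counts c hpos
  have hz := (List.sum_eq_zero_iff.mp h0) ((counts.getD c 0).toNat)
    (List.mem_map.mpr ⟨c, hmem, rfl⟩)
  omega

-- both branches of the backtracking step, stated as equations
theorem pvBacktrack_base (wordLen fuel : Nat) (counts : PySem.Dict Char Int)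
    (path : List Char) (h : path.length = wordLen) :
    pvBacktrack wordLen fuel counts path = [String.ofList path] := by
  rw [pvBacktrack.eq_def, if_pos h]

theorem pvBacktrack_step (wordLen fuel' : Nat) (counts : PySem.Dict Char Int)
    (path : List Char) (h : path.length ≠ wordLen) :
    pvBacktrack wordLen (fuel' + 1) counts path =
      (counts.keys.filter (fun c => decide (0 < counts.getD c 0))).flatMap
        (fun c => pvBacktrack wordLen fuel' (counts.modify c 0 (fun v => v - 1)) (path ++ [c])) := by
  rw [pvBacktrack.eq_def, if_neg h]
  show counts.keys.foldl (fun acc char =>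
    if 0 < counts.getD char 0 then
      acc ++ pvBacktrack wordLen fuel' (counts.modify char 0 (fun v => v - 1)) (path ++ [char])
    else acc) [] = _
  rw [PySem.List.foldl_ite_eq_foldl_filter (p := fun c => 0 < counts.getD c 0)
    (f := fun acc c => acc ++ pvBacktrack wordLen fuel' (counts.modify c 0 (fun v => v - 1)) (path ++ [c]))]
  rw [PySem.List.foldl_append_eq_flatMap]
  simp

theorem pv_keys_modify_sub_one (counts : PySem.Dict Char Int) (c : Char)
    (hpos : 0 < counts.getD c 0) :
    (counts.modify c 0 (fun v => v - 1)).keys = counts.keys := by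
  rw [PySem.Dict.keys_modify, PySem.Dict.keys_insert_of_contains]
  exact (PySem.Dict.contains_iff_mem_keys _ _).mpr (pv_mem_keys_of_getD_pos counts c hpos)

-- the singleton case: everything used up
theorem pvBacktrack_total_zero (wordLen fuel : Nat) (counts : PySem.Dict Char Int)
    (path : List Char) (hnn : ∀ c, 0 ≤ counts.getD c 0)
    (hsum : path.length + pvTotal counts = wordLen) (h0 : pvTotal counts = 0) :
    (pvBacktrack wordLen fuel counts path).Nodup ∧
    ∀ s, s ∈ pvBacktrack wordLen fuel counts path ↔
      ∃ r : List Char, s = String.ofList (path ++ r) ∧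
        ∀ c, (r.count c : Int) = counts.getD c 0 := by
  have hlen : path.length = wordLen := by omega
  rw [pvBacktrack_base _ _ _ _ hlen]
  refine ⟨List.nodup_singleton _, fun s => ?_⟩
  simp only [List.mem_singleton]
  constructor
  · rintro rfl
    exact ⟨[], by simp, fun c => by
      rw [pv_getD_zero_of_total_zero counts hnn h0 c]; simp⟩
  · rintro ⟨r, rfl, hcnt⟩
    have : r = [] := by
      cases r with
      | nil => rfl
      | cons d r' =>
        have := hcnt d
        rw [pv_getD_zero_of_total_zero counts hnn h0 d] at this
        simp at this
        omega
    subst this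
    simp

-- main invariant of A's backtracking
theorem pvBacktrack_spec :
    ∀ (fuel : Nat) (counts : PySem.Dict Char Int) (path : List Char) (wordLen : Nat),
      counts.keys.Nodup →
      (∀ c, 0 ≤ counts.getD c 0) →
      path.length + pvTotal counts = wordLen →
      pvTotal counts ≤ fuel →
      (pvBacktrack wordLen fuel counts path).Nodup ∧
      ∀ s, s ∈ pvBacktrack wordLen fuel counts path ↔
        ∃ r : List Char, s = String.ofList (path ++ r) ∧
          ∀ c, (r.count c : Int) = counts.getD c 0 := by
  intro fuel
  induction fuel with
  | zero =>
    intro counts path wordLen _ hnn hsum hfuel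
    exact pvBacktrack_total_zero _ _ _ _ hnn hsum (by omega)
  | succ fuel' ih =>
    intro counts path wordLen hk hnn hsum hfuel
    by_cases h0 : pvTotal counts = 0
    · exact pvBacktrack_total_zero _ _ _ _ hnn hsum h0
    · have hne : path.length ≠ wordLen := by omega
      rw [pvBacktrack_step _ _ _ _ hne]
      set L := counts.keys.filter (fun c => decide (0 < counts.getD c 0)) with hL
      have hmemL : ∀ c, c ∈ L ↔ 0 < counts.getD c 0 := by
        intro c
        rw [hL, List.mem_filter]
        constructor
        · intro ⟨_, h⟩; simpa using h
        · intro h; exact ⟨pv_mem_keys_of_getD_pos counts c h, by simpa using h⟩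
      -- the inductive hypothesis applied to each branch
      have hbranch : ∀ c ∈ L,
          (pvBacktrack wordLen fuel' (counts.modify c 0 (fun v => v - 1)) (path ++ [c])).Nodup ∧
          ∀ s, s ∈ pvBacktrack wordLen fuel' (counts.modify c 0 (fun v => v - 1)) (path ++ [c]) ↔
            ∃ r : List Char, s = String.ofList (path ++ [c] ++ r) ∧
              ∀ d, (r.count d : Int) = (counts.modify c 0 (fun v => v - 1)).getD d 0 := by
        intro c hc
        have hpos : 0 < counts.getD c 0 := (hmemL c).mp hc
        have htm := pvTotal_modify counts c hk hpos
        exact ih (counts.modify c 0 (fun v => v - 1)) (path ++ [c]) wordLen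
          (by rw [pv_keys_modify_sub_one counts c hpos]; exact hk)
          (fun d => by
            rw [PySem.Dict.getD_modify]
            split_ifs with hd
            · omega
            · exact hnn d)
          (by simp only [List.length_append, List.length_cons, List.length_nil]; omega)
          (by omega)
      constructor
      · -- Nodup of the flatMap
        rw [List.nodup_flatMap]
        refine ⟨fun c hc => (hbranch c hc).1, ?_⟩
        refine List.Pairwise.imp_of_mem ?_ ((hk.filter _) : L.Nodup)
        intro a b ha hb hab s hsa hsb
        rcases ((hbranch a ha).2 s).mp hsa with ⟨r1, h1, -⟩
        rcases ((hbranch b hb).2 s).mp hsb with ⟨r2, h2, -⟩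
        have heq := congrArg String.toList (h1.symm.trans h2)
        simp at heq
        exact hab heq.1
      · intro s
        rw [List.mem_flatMap]
        constructor
        · rintro ⟨c, hc, hs⟩
          rcases ((hbranch c hc).2 s).mp hs with ⟨r', rfl, hcnt'⟩
          have hpos : 0 < counts.getD c 0 := (hmemL c).mp hc
          refine ⟨c :: r', by simp, fun d => ?_⟩
          have := hcnt' d
          rw [PySem.Dict.getD_modify] at this
          by_cases hd : d = c
          · subst hd
            rw [if_pos rfl] at this
            rw [List.count_cons_self]
            push_cast
            omega
          · rw [if_neg hd] at this
            rw [List.count_cons, beq_false_of_ne (fun h => hd h.symm)]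
            simp only [Bool.false_eq_true, if_false]
            push_cast
            omega
        · rintro ⟨r, rfl, hcnt⟩
          obtain ⟨c0, hc0⟩ := pv_exists_pos_of_total_pos counts (by omega)
          have hr : r ≠ [] := by
            intro hnil
            have := hcnt c0
            rw [hnil] at this
            simp at this
            omega
          obtain ⟨d, r', rfl⟩ := List.exists_cons_of_ne_nil hr
          have hdpos : 0 < counts.getD d 0 := by
            have := hcnt d
            rw [List.count_cons_self] at this
            push_cast at this
            omega
          refine ⟨d, (hmemL d).mpr hdpos, ?_⟩
          apply ((hbranch d ((hmemL d).mpr hdpos)).2 _).mpr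
          refine ⟨r', by simp, fun e => ?_⟩
          rw [PySem.Dict.getD_modify]
          have := hcnt e
          by_cases he : e = d
          · subst he
            rw [List.count_cons_self] at this
            rw [if_pos rfl]
            push_cast at this
            omega
          · rw [if_neg he]
            rw [List.count_cons, beq_false_of_ne (fun h => he h.symm)] at this
            simp at this
            omega

-- the two branches of B's recursion, as equations
theorem pvGenB_nil (fuel : Nat) : pvGenB fuel [] = [""] := by
  rw [pvGenB.eq_def]
  simp

theorem pvGenB_cons (fuel' : Nat) (w : List Char) (hw : w ≠ []) :
    pvGenB (fuel' + 1) w =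
      (PySem.List.sorted (PySem.Set.ofList w) (fun c => c) false).foldl
        (fun result c =>
          match PySem.List.remove? w c with
          | none => result
          | some rest =>
            (pvGenB fuel' rest).foldl
              (fun res tail => res ++ [String.ofList (c :: tail.toList)]) result) [] := by
  rw [pvGenB.eq_def, if_neg (by simp [hw])]

-- main invariant of B's recursion: output is strictly increasing and holds exactly the anagrams
theorem pvGenB_spec :
    ∀ (fuel : Nat) (w : List Char), w.length ≤ fuel →
      (pvGenB fuel w).Pairwise (· < ·) ∧
      ∀ s, s ∈ pvGenB fuel w ↔ s.toList.Perm w := by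
  intro fuel
  induction fuel with
  | zero =>
    intro w hle
    have hw : w = [] := List.eq_nil_of_length_eq_zero (by omega)
    subst hw
    rw [pvGenB_nil]
    refine ⟨List.pairwise_singleton _ _, fun s => ?_⟩
    simp only [List.mem_singleton, List.perm_nil]
    constructor
    · rintro rfl; rfl
    · intro h; exact String.toList_inj.mp (by simp [h])
  | succ fuel' ih =>
    intro w hle
    by_cases hw : w = []
    · subst hw
      rw [pvGenB_nil]
      refine ⟨List.pairwise_singleton _ _, fun s => ?_⟩
      simp only [List.mem_singleton, List.perm_nil]
      constructor
      · rintro rfl; rfl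
      · intro h; exact String.toList_inj.mp (by simp [h])
    · rw [pvGenB_cons fuel' w hw]
      set D := PySem.List.sorted (PySem.Set.ofList w) (fun c => c) false with hD
      have hDperm : D.Perm (PySem.Set.ofList w) := PySem.List.sorted_perm _ _ _
      have hDmem : ∀ c, c ∈ D ↔ c ∈ w := fun c =>
        hDperm.mem_iff.trans (PySem.Set.mem_ofList _ _)
      have hDnodup : D.Nodup := hDperm.nodup_iff.mpr (PySem.Set.nodup_ofList w)
      have hDlt : D.Pairwise (· < ·) :=
        ((PySem.List.sorted_pairwise _ _).and hDnodup).imp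
          (fun h => lt_of_le_of_ne h.1 h.2)
      -- turn the loop into a flatMap over D
      have hfold :
          D.foldl
            (fun result c =>
              match PySem.List.remove? w c with
              | none => result
              | some rest =>
                (pvGenB fuel' rest).foldl
                  (fun res tail => res ++ [String.ofList (c :: tail.toList)]) result) [] =
          D.flatMap (fun c =>
            (pvGenB fuel' (w.erase c)).map (fun tail => String.ofList (c :: tail.toList))) := by
        have hcongr : ∀ (acc : List String) (c : Char), c ∈ D →
            (match PySem.List.remove? w c with
              | none => acc
              | some rest =>
                (pvGenB fuel' rest).foldl
                  (fun res tail => res ++ [String.ofList (c :: tail.toList)]) acc) =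
            acc ++ (pvGenB fuel' (w.erase c)).map (fun tail => String.ofList (c :: tail.toList)) := by
          intro acc c hc
          rw [PySem.List.remove?_eq_some_erase w c ((hDmem c).mp hc)]
          exact PySem.List.foldl_append_singleton_eq_map _ _ _
        rw [PySem.List.foldl_congr_mem D _ _ [] hcongr]
        rw [PySem.List.foldl_append_eq_flatMap]
        simp
      rw [hfold]
      have hrec : ∀ c ∈ D,
          (pvGenB fuel' (w.erase c)).Pairwise (· < ·) ∧
          ∀ s, s ∈ pvGenB fuel' (w.erase c) ↔ s.toList.Perm (w.erase c) := by
        intro c hc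
        apply ih
        have h1 := List.length_erase_of_mem ((hDmem c).mp hc)
        have h2 : 0 < w.length := List.length_pos_of_ne_nil hw
        omega
      constructor
      · -- strictly increasing
        rw [List.pairwise_flatMap]
        constructor
        · intro c hc
          exact ((hrec c hc).1).map _ (fun t1 t2 h => by
            rw [String.lt_iff_toList_lt]
            rw [show (String.ofList (c :: t1.toList)).toList = c :: t1.toList from by simp,
              show (String.ofList (c :: t2.toList)).toList = c :: t2.toList from by simp]
            exact List.cons_lt_cons_iff.mpr (Or.inr ⟨rfl, String.lt_iff_toList_lt.mp h⟩))
        · apply hDlt.imp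
          intro a b hab x hx y hy
          rcases List.mem_map.mp hx with ⟨t1, _, rfl⟩
          rcases List.mem_map.mp hy with ⟨t2, _, rfl⟩
          rw [String.lt_iff_toList_lt]
          rw [show (String.ofList (a :: t1.toList)).toList = a :: t1.toList from by simp,
            show (String.ofList (b :: t2.toList)).toList = b :: t2.toList from by simp]
          exact List.cons_lt_cons_iff.mpr (Or.inl hab)
      · intro s
        rw [List.mem_flatMap]
        constructor
        · rintro ⟨c, hc, hs⟩
          rcases List.mem_map.mp hs with ⟨t, ht, rfl⟩
          have htp := ((hrec c hc).2 t).mp ht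
          rw [show (String.ofList (c :: t.toList)).toList = c :: t.toList from by simp]
          exact List.cons_perm_iff_perm_erase.mpr ⟨(hDmem c).mp hc, htp⟩
        · intro hp
          have hne : s.toList ≠ [] := by
            intro h
            rw [h] at hp
            exact hw hp.symm.eq_nil
          obtain ⟨c, l, hcl⟩ := List.exists_cons_of_ne_nil hne
          have hp' : (c :: l).Perm w := hcl ▸ hp
          have hcw : c ∈ w := hp'.mem_iff.mp List.mem_cons_self
          have hlp : l.Perm (w.erase c) := (List.cons_perm_iff_perm_erase.mp hp').2
          refine ⟨c, (hDmem c).mpr hcw, ?_⟩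
          apply List.mem_map.mpr
          refine ⟨String.ofList l, ((hrec c ((hDmem c).mpr hcw)).2 _).mpr (by simpa using hlp), ?_⟩
          apply String.toList_inj.mp
          simp [← hcl]


-- sum of the counter equals the length of the word
theorem pvTotal_counter (w : List Char) : pvTotal (PySem.Dict.counter w) = w.length := by
  unfold pvTotal
  rw [PySem.Dict.keys_counter]
  rw [List.map_congr_left (g := fun c => w.count c)
    (fun c _ => by rw [PySem.Dict.getD_counter]; simp [List.count])]
  have hperm : (PySem.Set.ofList w).Perm w.dedup := by
    apply (List.perm_ext_iff_of_nodup (PySem.Set.nodup_ofList w) w.nodup_dedup).mpr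
    intro a
    rw [PySem.Set.mem_ofList, List.mem_dedup]
  rw [(hperm.map _).sum_eq]
  exact List.sum_map_count_dedup_eq_length w

-- ===== VERDICT (by name: the statement is the Claim_ definition above) =====
theorem generate_anagrams_spec : Claim_equal_generate_anagrams := by
  intro word _
  unfold Spec_generate_anagrams generate_anagrams generate_anagrams_alt
  set w := word.toList with hwdef
  have hk : (PySem.Dict.counter w).keys.Nodup := PySem.Dict.nodup_keys_counter w
  have hnn : ∀ c, 0 ≤ (PySem.Dict.counter w).getD c 0 := fun c => by
    rw [PySem.Dict.getD_counter]; positivity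
  have hA := pvBacktrack_spec w.length (PySem.Dict.counter w) [] w.length hk hnn
    (by simp [pvTotal_counter]) (le_of_eq (pvTotal_counter w))
  have hB := pvGenB_spec w.length w (le_refl _)
  apply PySem.List.sorted_eq_of_perm_of_pairwise_lt _ _ _ ?_ hB.1
  apply (List.perm_ext_iff_of_nodup (hB.1.imp ne_of_lt) hA.1).mpr
  intro s
  rw [(hB.2 s), (hA.2 s)]
  constructor
  · intro hp
    refine ⟨s.toList, by simp, fun c => ?_⟩
    rw [PySem.Dict.getD_counter]
    exact_mod_cast List.perm_iff_count.mp hp c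
  · rintro ⟨r, rfl, hcnt⟩
    simp only [List.nil_append]
    rw [show (String.ofList r).toList = r from by simp]
    apply List.perm_iff_count.mpr
    intro a
    have := hcnt a
    rw [PySem.Dict.getD_counter] at this
    exact_mod_cast this
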